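-- pv_equiv track=rewrite | github.com/KolodnitskyIlya/omgtu | olympiads/2 term/tau-ceti.py | generate_circular_word_list
-- ===== SOURCE A (Python) =====
-- def generate_circular_word_list(words):
--     circular_list = []
--     if len(words) % 2 == 0:
--         mid_idx = len(words) // 2
--         circular_list.append(words[mid_idx])
--         for i in range(1, mid_idx + 1):
--             circular_list.append(words[mid_idx - i])
--             if i < mid_idx:
--                 circular_list.append(words[mid_idx + i])
--     else:
--         mid_idx = (len(words) - 1) // 2
--         circular_list.append(words[mid_idx])
--         for i in range(1, mid_idx + 1):
--             circular_list.append(words[mid_idx - i])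
--             circular_list.append(words[mid_idx + i])
--     return circular_list
-- ===== SOURCE B (Python) =====
-- def generate_circular_word_list(words):
--     mid = len(words) // 2
--     center = words[mid]
--     left = words[:mid][::-1]
--     right = words[mid + 1:]
--     out = [center]
--     for l, r in zip(left, right):
--         out.append(l)
--         out.append(r)
--     if len(left) > len(right):
--         out.append(left[-1])
--     return out
-- ===== Notes on version B (the rewrite author's own statement) =====
-- stated objective: simpler
-- what changed: Replaces A's two parity-specific loops of index arithmetic with one uniform decomposition: take the center, slice out the reversed left half and the right half, and interleave them with a single zip pass plus an optional leftover element.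
import Mathlib
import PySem

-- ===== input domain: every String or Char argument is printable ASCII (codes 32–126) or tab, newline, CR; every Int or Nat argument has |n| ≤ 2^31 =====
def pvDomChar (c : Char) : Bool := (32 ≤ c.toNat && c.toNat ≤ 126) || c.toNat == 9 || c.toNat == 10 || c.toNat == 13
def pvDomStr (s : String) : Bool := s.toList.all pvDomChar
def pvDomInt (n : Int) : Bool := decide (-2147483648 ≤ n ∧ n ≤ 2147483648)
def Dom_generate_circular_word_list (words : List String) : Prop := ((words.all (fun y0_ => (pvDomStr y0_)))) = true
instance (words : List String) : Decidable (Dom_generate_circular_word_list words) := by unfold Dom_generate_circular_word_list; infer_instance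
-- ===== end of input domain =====

-- B replaces A's two parity-specific index loops by one uniform slice decomposition
-- (center, reversed left half, right half) interleaved with a single zip pass; objective: simpler.

-- ===== PORT A =====
def generate_circular_word_list (words : List String) : List String :=
  if PySem.Int.mod (PySem.List.len words) 2 == 0 then
    let mid : Int := PySem.Int.floordiv (PySem.List.len words) 2
    (PySem.List.pyRange 1 (mid + 1) 1).foldl
      (fun acc i =>
        let acc' := acc ++ [PySem.List.pyGetD words (mid - i) ""]
        if i < mid then acc' ++ [PySem.List.pyGetD words (mid + i) ""] else acc')
      [PySem.List.pyGetD words mid ""]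
  else
    let mid : Int := PySem.Int.floordiv (PySem.List.len words - 1) 2
    (PySem.List.pyRange 1 (mid + 1) 1).foldl
      (fun acc i =>
        acc ++ [PySem.List.pyGetD words (mid - i) ""] ++ [PySem.List.pyGetD words (mid + i) ""])
      [PySem.List.pyGetD words mid ""]

-- ===== PORT B =====
def generate_circular_word_list_alt (words : List String) : List String :=
  let mid : Int := PySem.Int.floordiv (PySem.List.len words) 2
  let center := PySem.List.pyGetD words mid ""
  let left := (PySem.List.slice words none (some mid)).reverse
  let right := PySem.List.slice words (some (mid + 1)) none
  let out := (left.zip right).foldl (fun acc p => acc ++ [p.1] ++ [p.2]) [center]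
  if left.length > right.length then out ++ [PySem.List.pyGetD left (-1) ""] else out

-- ===== PRECONDITION & SPEC =====
-- Pre_ excludes exactly the empty list, on which Python A raises IndexError (words[mid_idx]); B raises there too.
def Pre_generate_circular_word_list (words : List String) : Prop := words ≠ []
instance (words : List String) : Decidable (Pre_generate_circular_word_list words) := by
  unfold Pre_generate_circular_word_list; infer_instance
def pvWitness_generate_circular_word_list : List String := ["a", "b", "c", "d"]
def Spec_generate_circular_word_list (words : List String) (out : List String) : Prop := out = generate_circular_word_list_alt words
instance (words : List String) (out : List String) : Decidable (Spec_generate_circular_word_list words out) := by unfold Spec_generate_circular_word_list; infer_instance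

-- ===== CLAIM (what is proved, stated in full; the proofs are below) =====
def Claim_equal_generate_circular_word_list : Prop := ∀ (words : List String), Dom_generate_circular_word_list words → Pre_generate_circular_word_list words → Spec_generate_circular_word_list words (generate_circular_word_list words)

-- ===== LEMMAS AND PROOFS =====

-- the reversed left half, as a map over indices
lemma pv_revtake (w : List String) (m : Nat) (hm : m ≤ w.length) :
    (w.take m).reverse = (List.range m).map (fun j => w.getD (m - 1 - j) "") := by
  apply List.ext_getElem
  · simp [hm]
  · intro i h1 h2
    have hlen : (List.take m w).length = m := by simp [hm]
    simp only [List.length_reverse, hlen, List.length_map, List.length_range] at h1 h2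
    simp only [List.getElem_reverse, List.getElem_map, List.getElem_range, hlen]
    rw [List.getElem_take, List.getD_eq_getElem _ _ (by omega)]

-- the right half, as a map over indices
lemma pv_dropmap (w : List String) (m : Nat) :
    w.drop m = (List.range (w.length - m)).map (fun j => w.getD (m + j) "") := by
  apply List.ext_getElem
  · simp
  · intro i h1 h2
    simp only [List.length_drop, List.length_map, List.length_range] at h1 h2
    simp only [List.getElem_drop, List.getElem_map, List.getElem_range]
    rw [List.getD_eq_getElem _ _ (by omega)]

-- zip of two index maps is a map over the shorter index range
lemma pv_zipmap {α β : Type} (f : Nat → α) (g : Nat → β) (a b : Nat) :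
    ((List.range a).map f).zip ((List.range b).map g)
      = (List.range (min a b)).map (fun j => (f j, g j)) := by
  apply List.ext_getElem
  · simp
  · intro i h1 h2
    simp [List.getElem_zip]

-- B's value in closed form: center, then the zipped interleaving, then the leftover left element
lemma pv_alt_closed (w : List String) (m : Nat)
    (hdiv : PySem.Int.floordiv ((w.length : Int)) 2 = (m : Nat)) (hm : m ≤ w.length) :
    generate_circular_word_list_alt w =
      if m > w.length - (m + 1) then
        ([PySem.List.pyGetD w (m : Nat) ""] ++
          (List.range (min m (w.length - (m + 1)))).flatMap
            (fun j => [w.getD (m - 1 - j) ""] ++ [w.getD ((m + 1) + j) ""])) ++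
          [((List.range m).map (fun j => w.getD (m - 1 - j) "")).getLast?.getD ""]
      else
        [PySem.List.pyGetD w (m : Nat) ""] ++
          (List.range (min m (w.length - (m + 1)))).flatMap
            (fun j => [w.getD (m - 1 - j) ""] ++ [w.getD ((m + 1) + j) ""]) := by
  unfold generate_circular_word_list_alt
  simp only [PySem.List.len_eq, hdiv]
  rw [PySem.List.slice_to_natCast,
      show ((m : Nat) : Int) + 1 = (((m + 1 : Nat)) : Int) from by push_cast; ring,
      PySem.List.slice_from_natCast]
  rw [pv_revtake w m hm, pv_dropmap w (m + 1), pv_zipmap]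
  rw [show (fun (acc : List String) (p : String × String) => acc ++ [p.1] ++ [p.2])
        = fun acc p => acc ++ ([p.1] ++ [p.2]) from by funext acc p; simp]
  rw [PySem.List.foldl_append_eq_flatMap, List.flatMap_map]
  simp only [List.length_map, List.length_range]
  split_ifs with h
  · rw [show PySem.List.pyGetD ((List.range m).map (fun j => w.getD (m - 1 - j) "")) (-1) ""
          = ((List.range m).map (fun j => w.getD (m - 1 - j) "")).getLast?.getD "" from by
        simp [PySem.List.pyGetD, PySem.List.pyGet?_neg_one]]
  · rfl

-- A's even branch, as center plus a flat map over the loop range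
lemma pv_even_lhs (w : List String) (m : Nat) (hm : w.length = 2 * m) :
    generate_circular_word_list w =
      [PySem.List.pyGetD w (m : Nat) ""] ++
        (List.range m).flatMap
          (fun (k : Nat) => [PySem.List.pyGetD w ((m : Int) - (1 + (k : Int))) ""] ++
            if (1 + (k : Int)) < (m : Int) then [PySem.List.pyGetD w ((m : Int) + (1 + (k : Int))) ""] else []) := by
  have hdiv : PySem.Int.floordiv ((w.length : Int)) 2 = ((m : Nat) : Int) := by
    have h := PySem.Int.floordiv_natCast w.length 2
    have h2 : w.length / 2 = m := by omega
    rw [h2] at h; exact_mod_cast h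
  unfold generate_circular_word_list
  simp only [PySem.List.len_eq, hdiv]
  rw [if_pos (by simp; omega)]
  rw [show PySem.List.pyRange 1 (((m : Nat) : Int) + 1) 1
        = (List.range m).map (fun (k : Nat) => 1 + (k : Int)) from by
      apply List.ext_getElem
      · simp [PySem.List.length_pyRange_one]
      · intro i hi1 hi2
        simp [PySem.List.getElem_pyRange_one]]
  rw [show (fun (acc : List String) (i : Int) =>
        let acc' := acc ++ [PySem.List.pyGetD w ((m : Int) - i) ""];
        if i < ((m : Nat) : Int) then acc' ++ [PySem.List.pyGetD w ((m : Int) + i) ""] else acc')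
      = fun acc i => acc ++ ([PySem.List.pyGetD w ((m : Int) - i) ""] ++
          if i < (m : Int) then [PySem.List.pyGetD w ((m : Int) + i) ""] else []) from by
    funext acc i; by_cases h : i < (m : Int) <;> simp [h]]
  rw [PySem.List.foldl_append_eq_flatMap, List.flatMap_map]

-- A's odd branch, as center plus a flat map over the loop range
lemma pv_odd_lhs (w : List String) (m : Nat) (hm : w.length = 2 * m + 1) :
    generate_circular_word_list w =
      [PySem.List.pyGetD w (m : Nat) ""] ++
        (List.range m).flatMap
          (fun (k : Nat) => [PySem.List.pyGetD w ((m : Int) - (1 + (k : Int))) ""] ++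
            [PySem.List.pyGetD w ((m : Int) + (1 + (k : Int))) ""]) := by
  have hdiv : PySem.Int.floordiv ((w.length : Int) - 1) 2 = ((m : Nat) : Int) := by
    rw [show (w.length : Int) - 1 = ((w.length - 1 : Nat) : Int) from by omega]
    have h := PySem.Int.floordiv_natCast (w.length - 1) 2
    have h2 : (w.length - 1) / 2 = m := by omega
    rw [h2] at h; exact_mod_cast h
  unfold generate_circular_word_list
  simp only [PySem.List.len_eq, hdiv]
  rw [if_neg (by simp; omega)]
  rw [show PySem.List.pyRange 1 (((m : Nat) : Int) + 1) 1
        = (List.range m).map (fun (k : Nat) => 1 + (k : Int)) from by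
      apply List.ext_getElem
      · simp [PySem.List.length_pyRange_one]
      · intro i hi1 hi2
        simp [PySem.List.getElem_pyRange_one]]
  rw [show (fun (acc : List String) (i : Int) =>
        acc ++ [PySem.List.pyGetD w ((m : Int) - i) ""] ++ [PySem.List.pyGetD w ((m : Int) + i) ""])
      = fun acc i => acc ++ ([PySem.List.pyGetD w ((m : Int) - i) ""] ++
          [PySem.List.pyGetD w ((m : Int) + i) ""]) from by
    funext acc i; simp]
  rw [PySem.List.foldl_append_eq_flatMap, List.flatMap_map]

theorem pv_even_case (w : List String) (m : Nat) (hm : w.length = 2 * m) (h1 : 1 ≤ m) :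
    generate_circular_word_list w = generate_circular_word_list_alt w := by
  have hdiv : PySem.Int.floordiv ((w.length : Int)) 2 = ((m : Nat) : Int) := by
    have h := PySem.Int.floordiv_natCast w.length 2
    have h2 : w.length / 2 = m := by omega
    rw [h2] at h; exact_mod_cast h
  rw [pv_even_lhs w m hm, pv_alt_closed w m hdiv (by omega)]
  rw [show w.length - (m + 1) = m - 1 from by omega]
  rw [if_pos (by omega), show min m (m - 1) = m - 1 from by omega]
  have hlast : ((List.range m).map (fun j => w.getD (m - 1 - j) "")).getLast?.getD ""
      = w.getD (m - 1 - (m - 1)) "" := by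
    rw [List.getLast?_eq_getElem?]
    simp only [List.length_map, List.length_range]
    rw [List.getElem?_map, List.getElem?_range (by omega)]
    rfl
  rw [hlast]
  have hsplit : List.range m = List.range (m - 1) ++ [m - 1] := by
    conv_lhs => rw [show m = (m - 1) + 1 from by omega]
    rw [List.range_succ]
  rw [hsplit, List.flatMap_append]
  rw [List.flatMap_congr (g := fun (j : Nat) => [w.getD (m - 1 - j) ""] ++ [w.getD ((m + 1) + j) ""])
      (by intro k hk
          simp only [List.mem_range] at hk
          rw [if_pos (by omega)]
          rw [show (m : Int) - (1 + (k : Int)) = (((m - 1 - k : Nat)) : Int) from by omega,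
              show (m : Int) + (1 + (k : Int)) = ((((m + 1) + k : Nat)) : Int) from by omega,
              PySem.List.pyGetD_natCast, PySem.List.pyGetD_natCast])]
  simp only [List.flatMap_cons, List.flatMap_nil, List.append_nil]
  rw [if_neg (by omega)]
  rw [show (m : Int) - (1 + ((m - 1 : Nat) : Int)) = (((m - 1 - (m - 1) : Nat)) : Int) from by omega]
  rw [PySem.List.pyGetD_natCast]
  simp [PySem.List.pyGetD_zero, List.getD]

theorem pv_odd_case (w : List String) (m : Nat) (hm : w.length = 2 * m + 1) :
    generate_circular_word_list w = generate_circular_word_list_alt w := by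
  have hdiv : PySem.Int.floordiv ((w.length : Int)) 2 = ((m : Nat) : Int) := by
    have h := PySem.Int.floordiv_natCast w.length 2
    have h2 : w.length / 2 = m := by omega
    rw [h2] at h; exact_mod_cast h
  rw [pv_odd_lhs w m hm, pv_alt_closed w m hdiv (by omega)]
  rw [show w.length - (m + 1) = m from by omega]
  rw [if_neg (by omega), Nat.min_self]
  rw [List.flatMap_congr (g := fun (j : Nat) => [w.getD (m - 1 - j) ""] ++ [w.getD ((m + 1) + j) ""])
      (by intro k hk
          simp only [List.mem_range] at hk
          rw [show (m : Int) - (1 + (k : Int)) = (((m - 1 - k : Nat)) : Int) from by omega,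
              show (m : Int) + (1 + (k : Int)) = ((((m + 1) + k : Nat)) : Int) from by omega,
              PySem.List.pyGetD_natCast, PySem.List.pyGetD_natCast])]

-- ===== VERDICT (by name: the statement is the Claim_ definition above) =====
theorem generate_circular_word_list_spec : Claim_equal_generate_circular_word_list := by
  intro words _ hpre
  unfold Pre_generate_circular_word_list at hpre
  unfold Spec_generate_circular_word_list
  have hn : 0 < words.length := List.length_pos_of_ne_nil hpre
  rcases Nat.even_or_odd words.length with ⟨m, hm⟩ | ⟨m, hm⟩
  · exact pv_even_case words m (by omega) (by omega)
  · exact pv_odd_case words m (by omega)
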